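-- pv_equiv track=rewrite | github.com/t4d-classes/python_03012021 | calc.py | calc_ops_count_table
-- ===== SOURCE A (Python) =====
-- def calc_ops_count_table(calc_history_list):
--
--     add_count = 0
--     subtract_count = 0
--     multiply_count = 0
--     divide_count = 0
--
--     for _1, op_name, _2 in calc_history_list:
--         if op_name == "add":
--             add_count += 1
--         elif op_name == "subtract":
--             subtract_count += 1
--         elif op_name == "multiply":
--             multiply_count += 1
--         elif op_name == "divide":
--             divide_count += 1
--
--     count_table = []
--     count_table.append("Op Counts")
--     count_table.append("----------------")
--     count_table.append(f"Add: {add_count}")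
--     count_table.append(f"Subtract: {subtract_count}")
--     count_table.append(f"Multiply: {multiply_count}")
--     count_table.append(f"Divide: {divide_count}")
--
--     return "\n".join(count_table)
-- ===== SOURCE B (Python) =====
-- def calc_ops_count_table(calc_history_list):
--     def tally(rows):
--         if len(rows) == 0:
--             return (0, 0, 0, 0)
--         if len(rows) == 1:
--             _1, op_name, _2 = rows[0]
--             return (1 if op_name == "add" else 0,
--                     1 if op_name == "subtract" else 0,
--                     1 if op_name == "multiply" else 0,
--                     1 if op_name == "divide" else 0)
--         mid = len(rows) // 2
--         la, ls, lm, ld = tally(rows[:mid])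
--         ra, rs, rm, rd = tally(rows[mid:])
--         return (la + ra, ls + rs, lm + rm, ld + rd)
--
--     add_count, subtract_count, multiply_count, divide_count = tally(calc_history_list)
--     return "\n".join([
--         "Op Counts",
--         "----------------",
--         f"Add: {add_count}",
--         f"Subtract: {subtract_count}",
--         f"Multiply: {multiply_count}",
--         f"Divide: {divide_count}",
--     ])
-- ===== Notes on version B (the rewrite author's own statement) =====
-- stated objective: alternative
-- what changed: Replaces A's single left-to-right pass with four scalar accumulators by a divide-and-conquer tally: the history is split at the midpoint, the two halves are tallied recursively, and the 4-tuples of counts are added; the same fixed table is then formatted.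
import Mathlib
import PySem

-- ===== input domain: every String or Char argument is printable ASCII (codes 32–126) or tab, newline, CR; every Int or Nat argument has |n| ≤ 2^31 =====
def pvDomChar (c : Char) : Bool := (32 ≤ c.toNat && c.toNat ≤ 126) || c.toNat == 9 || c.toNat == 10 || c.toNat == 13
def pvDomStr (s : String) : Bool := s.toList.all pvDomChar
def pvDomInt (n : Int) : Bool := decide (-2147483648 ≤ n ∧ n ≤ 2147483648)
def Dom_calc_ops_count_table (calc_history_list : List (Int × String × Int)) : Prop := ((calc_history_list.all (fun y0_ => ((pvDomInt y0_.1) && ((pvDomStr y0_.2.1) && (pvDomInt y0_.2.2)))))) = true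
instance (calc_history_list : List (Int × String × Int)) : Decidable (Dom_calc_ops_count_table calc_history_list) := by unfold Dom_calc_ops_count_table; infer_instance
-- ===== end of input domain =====

-- B replaces A's single pass with four scalar accumulators by a divide-and-conquer
-- tally (split at the midpoint, tally the halves recursively, add the count tuples);
-- same cost class, a genuinely different recursion structure (objective: alternative).

-- ===== PORT A =====
def calc_ops_count_table (calc_history_list : List (Int × String × Int)) : String :=
  let c : Int × Int × Int × Int :=
    calc_history_list.foldl (fun s r =>
      let op_name := r.2.1
      if op_name = "add" then (s.1 + 1, s.2.1, s.2.2.1, s.2.2.2)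
      else if op_name = "subtract" then (s.1, s.2.1 + 1, s.2.2.1, s.2.2.2)
      else if op_name = "multiply" then (s.1, s.2.1, s.2.2.1 + 1, s.2.2.2)
      else if op_name = "divide" then (s.1, s.2.1, s.2.2.1, s.2.2.2 + 1)
      else s) (0, 0, 0, 0)
  PySem.Str.join "\n"
    ["Op Counts", "----------------",
     "Add: " ++ PySem.Int.toStr c.1,
     "Subtract: " ++ PySem.Int.toStr c.2.1,
     "Multiply: " ++ PySem.Int.toStr c.2.2.1,
     "Divide: " ++ PySem.Int.toStr c.2.2.2]

-- ===== PORT B =====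
-- used by pvTally's decreasing_by: len // 2 as a Nat cast
theorem pv_mid_eq (n : Nat) : PySem.Int.floordiv (n : Int) 2 = ((n / 2 : Nat) : Int) := by
  exact_mod_cast PySem.Int.floordiv_natCast n 2

-- tally(rows): divide-and-conquer count of the four op names, as in Source B
def pvTally : List (Int × String × Int) → Int × Int × Int × Int
  | [] => (0, 0, 0, 0)
  | [r] =>
    (if r.2.1 = "add" then 1 else 0,
     if r.2.1 = "subtract" then 1 else 0,
     if r.2.1 = "multiply" then 1 else 0,
     if r.2.1 = "divide" then 1 else 0)
  | a :: b :: rest =>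
    let rows := a :: b :: rest
    let mid : Int := PySem.Int.floordiv (rows.length : Int) 2
    let l := pvTally (PySem.List.slice rows none (some mid))
    let r := pvTally (PySem.List.slice rows (some mid) none)
    (l.1 + r.1, l.2.1 + r.2.1, l.2.2.1 + r.2.2.1, l.2.2.2 + r.2.2.2)
termination_by rows => rows.length
decreasing_by
  all_goals
    simp only [pv_mid_eq, PySem.List.slice_to_natCast, PySem.List.slice_from_natCast,
      List.length_take, List.length_drop, List.length_cons]
    omega

def calc_ops_count_table_alt (calc_history_list : List (Int × String × Int)) : String :=
  let c := pvTally calc_history_list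
  PySem.Str.join "\n"
    ["Op Counts", "----------------",
     "Add: " ++ PySem.Int.toStr c.1,
     "Subtract: " ++ PySem.Int.toStr c.2.1,
     "Multiply: " ++ PySem.Int.toStr c.2.2.1,
     "Divide: " ++ PySem.Int.toStr c.2.2.2]

-- ===== PRECONDITION & SPEC =====
def Spec_calc_ops_count_table (calc_history_list : List (Int × String × Int)) (out : String) : Prop := out = calc_ops_count_table_alt calc_history_list
instance (calc_history_list : List (Int × String × Int)) (out : String) : Decidable (Spec_calc_ops_count_table calc_history_list out) := by unfold Spec_calc_ops_count_table; infer_instance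

-- ===== CLAIM (what is proved, stated in full; the proofs are below) =====
def Claim_equal_calc_ops_count_table : Prop := ∀ (calc_history_list : List (Int × String × Int)), Dom_calc_ops_count_table calc_history_list → Spec_calc_ops_count_table calc_history_list (calc_ops_count_table calc_history_list)

-- ===== LEMMAS AND PROOFS =====

-- the canonical count tuple both programs compute
def pvCnt (h : List (Int × String × Int)) (k : String) : Int :=
  ((h.map (fun r => r.2.1)).count k : Int)

theorem pv_fold_counts (h : List (Int × String × Int)) (s : Int × Int × Int × Int) :
    h.foldl (fun s r =>
      let op_name := r.2.1
      if op_name = "add" then (s.1 + 1, s.2.1, s.2.2.1, s.2.2.2)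
      else if op_name = "subtract" then (s.1, s.2.1 + 1, s.2.2.1, s.2.2.2)
      else if op_name = "multiply" then (s.1, s.2.1, s.2.2.1 + 1, s.2.2.2)
      else if op_name = "divide" then (s.1, s.2.1, s.2.2.1, s.2.2.2 + 1)
      else s) s =
    (s.1 + pvCnt h "add", s.2.1 + pvCnt h "subtract",
     s.2.2.1 + pvCnt h "multiply", s.2.2.2 + pvCnt h "divide") := by
  induction h generalizing s with
  | nil => simp [pvCnt]
  | cons r t ih =>
    simp only [List.foldl_cons, pvCnt, List.map_cons, List.count_cons, beq_iff_eq] at ih ⊢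
    split_ifs <;> rw [ih] <;> clear ih <;>
      simp only [Prod.mk.injEq] <;> refine ⟨?_, ?_, ?_, ?_⟩ <;>
      first
        | (push_cast; omega)
        | (exfalso; simp_all)

theorem pv_cnt_split (h : List (Int × String × Int)) (m : Nat) (k : String) :
    pvCnt h k = pvCnt (h.take m) k + pvCnt (h.drop m) k := by
  unfold pvCnt
  conv_lhs => rw [← List.take_append_drop m h]
  rw [List.map_append, List.count_append]
  push_cast; ring

theorem pv_tally_eq (h : List (Int × String × Int)) :
    pvTally h = (pvCnt h "add", pvCnt h "subtract", pvCnt h "multiply", pvCnt h "divide") := by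
  induction h using pvTally.induct with
  | case1 => simp [pvTally, pvCnt]
  | case2 r =>
    simp only [pvTally, pvCnt, List.map_cons, List.map_nil, List.count_cons, List.count_nil,
      beq_iff_eq]
    split_ifs <;> simp_all
  | case3 a b rest rows mid ih1 ih2 =>
    rw [pvTally]
    simp only [rows, mid, pv_mid_eq, PySem.List.slice_to_natCast,
      PySem.List.slice_from_natCast] at ih1 ih2 ⊢
    rw [ih1, ih2]
    simp only [Prod.mk.injEq]
    refine ⟨?_, ?_, ?_, ?_⟩ <;> rw [pv_cnt_split (a :: b :: rest) ((a :: b :: rest).length / 2)]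

-- ===== VERDICT (by name: the statement is the Claim_ definition above) =====
theorem calc_ops_count_table_spec : Claim_equal_calc_ops_count_table := by
  intro h _
  show calc_ops_count_table h = calc_ops_count_table_alt h
  simp only [calc_ops_count_table, calc_ops_count_table_alt, pv_fold_counts, pv_tally_eq]
  norm_num
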